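-- pv_equiv track=rewrite | github.com/PryceNotHouck/DoomspayClock | Get Data/normalize_annual.py | priority_queue
-- ===== SOURCE A (Python) =====
-- import heapq
--
-- def priority_queue(data):
--     # Priority Queue - Associate the index for each weight with its rank among all other weights, used to ensure that
--     # all years' weights total up to +/- 1 if any values are missing.
--     priority = []
--     descending = sorted(data, reverse=True)
--     for i in range(len(data)):
--         for j in range(len(descending)):
--             if data[i] == descending[j]:
--                 heapq.heappush(priority, (j+1, i))
--     return priority
-- ===== SOURCE B (Python) =====
-- import heapq
--
-- def priority_queue(data):
--     # Counting ranks instead of sorting: the descending-order ranks of value v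
--     # are the contiguous range (#elements greater than v,
--     # #greater + multiplicity of v], so no sorted list is ever built.
--     priority = []
--     for i, v in enumerate(data):
--         greater = 0
--         equal = 0
--         for x in data:
--             if x > v:
--                 greater += 1
--             elif x == v:
--                 equal += 1
--         for r in range(greater + 1, greater + equal + 1):
--             heapq.heappush(priority, (r, i))
--     return priority
-- ===== Notes on version B (the rewrite author's own statement) =====
-- stated objective: alternative
-- what changed: B never sorts: it computes each index's rank range arithmetically by counting, per element, how many values are strictly greater and how many are equal, then pushes that contiguous range of ranks, whereas A sorts the data and rescans the sorted list for matches.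
import Mathlib
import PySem

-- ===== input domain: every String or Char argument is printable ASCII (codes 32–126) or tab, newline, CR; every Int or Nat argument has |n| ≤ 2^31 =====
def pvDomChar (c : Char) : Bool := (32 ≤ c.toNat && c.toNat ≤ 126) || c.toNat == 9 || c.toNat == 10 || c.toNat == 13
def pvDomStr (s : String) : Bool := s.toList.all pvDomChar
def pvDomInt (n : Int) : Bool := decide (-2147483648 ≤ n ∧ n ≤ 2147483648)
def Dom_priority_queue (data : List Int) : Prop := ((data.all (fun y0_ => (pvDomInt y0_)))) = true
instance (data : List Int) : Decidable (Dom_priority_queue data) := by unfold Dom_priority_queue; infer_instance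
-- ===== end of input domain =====

-- B replaces A's sort-and-rescan by pure counting: each index's ranks are the contiguous
-- range (#greater, #greater + multiplicity]; an alternative algorithm with no sorting.

-- Shared library helper: exact port of CPython's heapq.heappush / _siftdown for (Int × Int)
-- items compared by Python's lexicographic tuple '<' (both Pythons call heapq.heappush).
def heapSiftdown (heap : List (Int × Int)) (pos : Nat) (item : Int × Int) : List (Int × Int) :=
  if h : 0 < pos then
    let parentpos := (pos - 1) / 2
    let parent := heap.getD parentpos (0, 0)
    if item.1 < parent.1 ∨ (item.1 = parent.1 ∧ item.2 < parent.2) then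
      heapSiftdown (heap.set pos parent) parentpos item
    else heap.set pos item
  else heap.set pos item
termination_by pos
decreasing_by exact Nat.lt_of_le_of_lt (Nat.div_le_self _ _) (by omega)

def heappush (heap : List (Int × Int)) (item : Int × Int) : List (Int × Int) :=
  heapSiftdown (heap ++ [item]) heap.length item

-- ===== PORT A =====
def priority_queue (data : List Int) : List (Int × Int) :=
  let descending := PySem.List.sorted data (fun x => x) true
  (PySem.List.pyRange 0 (PySem.List.len data) 1).foldl (fun priority i =>
    (PySem.List.pyRange 0 (PySem.List.len descending) 1).foldl (fun priority j =>
      if PySem.List.pyGetD data i 0 == PySem.List.pyGetD descending j 0 then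
        heappush priority (j + 1, i)
      else priority) priority) []

-- ===== PORT B =====
def priority_queue_alt (data : List Int) : List (Int × Int) :=
  (PySem.List.enumerate data).foldl (fun priority p =>
    let counts :=
      data.foldl (fun (s : Int × Int) x =>
        if p.2 < x then (s.1 + 1, s.2)
        else if x == p.2 then (s.1, s.2 + 1)
        else s) (0, 0)
    (PySem.List.pyRange (counts.1 + 1) (counts.1 + counts.2 + 1) 1).foldl
      (fun h r => heappush h (r, p.1)) priority) []

-- ===== PRECONDITION & SPEC =====
def Spec_priority_queue (data : List Int) (out : List (Int × Int)) : Prop := out = priority_queue_alt data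
instance (data : List Int) (out : List (Int × Int)) : Decidable (Spec_priority_queue data out) := by unfold Spec_priority_queue; infer_instance

-- ===== CLAIM (what is proved, stated in full; the proofs are below) =====
def Claim_equal_priority_queue : Prop := ∀ (data : List Int), Dom_priority_queue data → Spec_priority_queue data (priority_queue data)

-- ===== LEMMAS AND PROOFS =====

-- B's counting loop computes (countP (v < ·), count v), shifted by the initial accumulator.
theorem count_loop (l : List Int) (v g e : Int) :
    l.foldl (fun (s : Int × Int) x =>
        if v < x then (s.1 + 1, s.2)
        else if x == v then (s.1, s.2 + 1)
        else s) (g, e)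
      = (g + (l.countP (fun x => decide (v < x)) : Int), e + (l.count v : Int)) := by
  induction l generalizing g e with
  | nil => simp
  | cons a t ih =>
      by_cases h1 : v < a
      · have hne : (a == v) = false := by simp; omega
        simp only [List.foldl_cons, List.count_cons, List.countP_cons, if_pos h1, hne, ih]
        simp; omega
      · by_cases h2 : a = v
        · simp only [List.foldl_cons, List.count_cons, List.countP_cons, h2, ih]
          simp [h1]; omega
        · have hne : (a == v) = false := by simp [h2]
          simp only [List.foldl_cons, List.count_cons, List.countP_cons, if_neg h1, hne, ih]
          simp [h1]

-- In a descending-sorted list an upward-closed predicate holds exactly on a prefix.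
theorem prefix_countP (p : Int → Bool) (hmono : ∀ a b : Int, b ≤ a → p b = true → p a = true) :
    ∀ (l : List Int), l.Pairwise (fun a b => b ≤ a) →
      ∀ (k : Nat) (hk : k < l.length), (p l[k] = true ↔ k < l.countP p) := by
  intro l hsort
  induction l with
  | nil => intro k hk; simp at hk
  | cons a t ih =>
      intro k hk
      have hall : ∀ b ∈ t, b ≤ a := (List.pairwise_cons.1 hsort).1
      have htail := ih (List.pairwise_cons.1 hsort).2
      cases k with
      | zero =>
          simp only [List.getElem_cons_zero, List.countP_cons]
          constructor
          · intro hp; simp [hp]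
          · intro hlt
            by_contra hpa
            have h0 : t.countP p = 0 := by
              rw [List.countP_eq_zero]
              intro b hb hpb
              exact hpa (hmono a b (hall b hb) hpb)
            simp [h0, Bool.eq_false_iff.2 hpa] at hlt
      | succ k' =>
          have hk' : k' < t.length := by simpa using hk
          simp only [List.getElem_cons_succ, List.countP_cons]
          rw [htail k' hk']
          by_cases hpa : p a = true
          · simp [hpa]
          · have h0 : t.countP p = 0 := by
              rw [List.countP_eq_zero]
              intro b hb hpb
              exact hpa (hmono a b (hall b hb) hpb)
            simp [h0, Bool.eq_false_iff.2 hpa]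

-- countP (v ≤ ·) splits as countP (v < ·) + count v.
theorem countP_le_split (l : List Int) (v : Int) :
    l.countP (fun x => decide (v ≤ x)) = l.countP (fun x => decide (v < x)) + l.count v := by
  induction l with
  | nil => simp
  | cons a t ih =>
      simp only [List.countP_cons, List.count_cons, ih]
      by_cases h1 : v < a
      · have : a ≠ v := by omega
        simp [h1, le_of_lt h1, this]; omega
      · by_cases h2 : a = v
        · simp [h1, h2]; omega
        · have : ¬ v ≤ a := by omega
          simp [h1, h2, this]

-- The positions of v in the descending-sorted list form exactly the range
-- [countP (v < ·), countP (v < ·) + count v).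
theorem pos_char (data : List Int) (v : Int) (k : Nat)
    (hk : k < (PySem.List.sorted data (fun x => x) true).length) :
    ((PySem.List.sorted data (fun x => x) true)[k] = v ↔
      data.countP (fun x => decide (v < x)) ≤ k ∧
      k < data.countP (fun x => decide (v < x)) + data.count v) := by
  have hperm : (PySem.List.sorted data (fun x => x) true).Perm data :=
    PySem.List.sorted_perm data (fun x => x) true
  have hsort : (PySem.List.sorted data (fun x => x) true).Pairwise (fun a b => b ≤ a) := by
    simpa using PySem.List.sorted_pairwise_rev data (fun x => x)
  have h1 := prefix_countP (fun x => decide (v < x))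
    (by intro a b hba h; simp only [decide_eq_true_iff] at *; omega)
    (PySem.List.sorted data (fun x => x) true) hsort k hk
  have h2 := prefix_countP (fun x => decide (v ≤ x))
    (by intro a b hba h; simp only [decide_eq_true_iff] at *; omega)
    (PySem.List.sorted data (fun x => x) true) hsort k hk
  rw [countP_le_split] at h2
  rw [hperm.countP_eq] at h1
  rw [hperm.countP_eq, hperm.count_eq] at h2
  simp only [decide_eq_true_iff] at h1 h2
  constructor
  · intro he
    have hv2 : k < data.countP (fun x => decide (v < x)) + data.count v := h2.1 (by omega)
    have hv1 : ¬ k < data.countP (fun x => decide (v < x)) := fun h => by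
      have := h1.2 h; omega
    omega
  · rintro ⟨hga, hlt⟩
    have hv2 : v ≤ (PySem.List.sorted data (fun x => x) true)[k] := h2.2 hlt
    have hv1 : ¬ v < (PySem.List.sorted data (fun x => x) true)[k] := fun h => by
      have := h1.1 h; omega
    omega

-- A's inner scan of the sorted list, as a filter, is exactly B's arithmetic rank range.
theorem filter_eq_range (data : List Int) (v : Int) :
    (PySem.List.pyRange 0 (PySem.List.len (PySem.List.sorted data (fun x => x) true)) 1).filter
        (fun j => v == PySem.List.pyGetD (PySem.List.sorted data (fun x => x) true) j 0)
      = PySem.List.pyRange ((data.countP (fun x => decide (v < x)) : Int))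
          (((data.countP (fun x => decide (v < x)) : Int)) + ((data.count v : Int))) 1 := by
  have hperm : (PySem.List.sorted data (fun x => x) true).Perm data :=
    PySem.List.sorted_perm data (fun x => x) true
  have hlen : (PySem.List.sorted data (fun x => x) true).length = data.length := hperm.length_eq
  have hge : data.countP (fun x => decide (v < x)) + data.count v ≤ data.length := by
    have h := List.countP_le_length (p := fun x => decide (v ≤ x)) (l := data)
    rw [countP_le_split] at h; exact h
  have key : ∀ j : Int, 0 ≤ j → j < ((PySem.List.sorted data (fun x => x) true).length : Int) →
      ((v == PySem.List.pyGetD (PySem.List.sorted data (fun x => x) true) j 0) = true ↔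
        ((data.countP (fun x => decide (v < x)) : Int) ≤ j ∧
          j < (data.countP (fun x => decide (v < x)) : Int) + (data.count v : Int))) := by
    intro j h0 hj
    rw [PySem.List.pyGetD_eq_getElem _ 0 h0 hj]
    have hk : j.toNat < (PySem.List.sorted data (fun x => x) true).length := by omega
    rw [beq_iff_eq, eq_comm, pos_char data v j.toNat hk]
    omega
  have e1 : PySem.List.pyRange 0 (PySem.List.len (PySem.List.sorted data (fun x => x) true)) 1
      = PySem.List.pyRange 0 ((data.countP (fun x => decide (v < x)) : Int)) 1
        ++ PySem.List.pyRange ((data.countP (fun x => decide (v < x)) : Int))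
            (((data.countP (fun x => decide (v < x)) : Int)) + ((data.count v : Int))) 1
        ++ PySem.List.pyRange (((data.countP (fun x => decide (v < x)) : Int)) + ((data.count v : Int)))
            ((PySem.List.sorted data (fun x => x) true).length : Int) 1 := by
    have hl : PySem.List.len (PySem.List.sorted data (fun x => x) true)
        = ((PySem.List.sorted data (fun x => x) true).length : Int) := by
      simp [PySem.List.len]
    rw [hl, PySem.List.pyRange_one_append 0 ((data.countP (fun x => decide (v < x)) : Int))
          (((PySem.List.sorted data (fun x => x) true).length : Int)) (by positivity)
          (by rw [hlen]; omega),
        PySem.List.pyRange_one_append ((data.countP (fun x => decide (v < x)) : Int))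
          (((data.countP (fun x => decide (v < x)) : Int)) + ((data.count v : Int)))
          (((PySem.List.sorted data (fun x => x) true).length : Int)) (by omega)
          (by rw [hlen]; omega)]
    rw [List.append_assoc]
  rw [e1, List.filter_append, List.filter_append]
  have hnil1 : (PySem.List.pyRange 0 ((data.countP (fun x => decide (v < x)) : Int)) 1).filter
      (fun j => v == PySem.List.pyGetD (PySem.List.sorted data (fun x => x) true) j 0) = [] := by
    rw [List.filter_eq_nil_iff]
    intro j hj
    rw [PySem.List.mem_pyRange_one] at hj
    have hjn : j < ((PySem.List.sorted data (fun x => x) true).length : Int) := by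
      rw [hlen]; omega
    intro hb
    have := (key j hj.1 hjn).1 hb
    omega
  have hnil2 : (PySem.List.pyRange (((data.countP (fun x => decide (v < x)) : Int)) + ((data.count v : Int)))
        ((PySem.List.sorted data (fun x => x) true).length : Int) 1).filter
      (fun j => v == PySem.List.pyGetD (PySem.List.sorted data (fun x => x) true) j 0) = [] := by
    rw [List.filter_eq_nil_iff]
    intro j hj
    rw [PySem.List.mem_pyRange_one] at hj
    intro hb
    have h0 : (0:Int) ≤ j := le_trans (by positivity) hj.1
    have := (key j h0 hj.2).1 hb
    omega
  have hself : (PySem.List.pyRange ((data.countP (fun x => decide (v < x)) : Int))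
        (((data.countP (fun x => decide (v < x)) : Int)) + ((data.count v : Int))) 1).filter
      (fun j => v == PySem.List.pyGetD (PySem.List.sorted data (fun x => x) true) j 0)
      = PySem.List.pyRange ((data.countP (fun x => decide (v < x)) : Int))
          (((data.countP (fun x => decide (v < x)) : Int)) + ((data.count v : Int))) 1 := by
    rw [List.filter_eq_self]
    intro j hj
    rw [PySem.List.mem_pyRange_one] at hj
    have h0 : (0:Int) ≤ j := le_trans (by positivity) hj.1
    have hjn : j < ((PySem.List.sorted data (fun x => x) true).length : Int) := by
      rw [hlen]; omega
    exact (key j h0 hjn).2 hj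
  rw [hnil1, hnil2, hself]
  simp

theorem priority_queue_spec : Claim_equal_priority_queue := by
  intro data _
  unfold Spec_priority_queue priority_queue priority_queue_alt
  dsimp only
  rw [PySem.List.enumerate_eq_map_pyRange (d := 0), List.foldl_map]
  congr 1
  funext priority i
  dsimp only
  rw [count_loop]
  rw [PySem.List.foldl_if_eq_foldl_filter
        (p := fun j => PySem.List.pyGetD data i 0 == PySem.List.pyGetD (PySem.List.sorted data (fun x => x) true) j 0)]
  rw [filter_eq_range data (PySem.List.pyGetD data i 0)]
  rw [PySem.List.pyRange_one, PySem.List.pyRange_one, List.foldl_map, List.foldl_map]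
  have harg : ((0 : Int) + (data.countP (fun x => decide (PySem.List.pyGetD data i 0 < x)) : Int)
      + (0 + (data.count (PySem.List.pyGetD data i 0) : Int)) + 1
      - (0 + (data.countP (fun x => decide (PySem.List.pyGetD data i 0 < x)) : Int) + 1)).toNat
      = ((data.countP (fun x => decide (PySem.List.pyGetD data i 0 < x)) : Int)
          + (data.count (PySem.List.pyGetD data i 0) : Int)
          - (data.countP (fun x => decide (PySem.List.pyGetD data i 0 < x)) : Int)).toNat := by
    omega
  rw [harg]
  congr 1
  funext h k
  refine congrArg _ ?_
  simp only [Prod.mk.injEq]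
  exact ⟨by ring, trivial⟩
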